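-- pv_equiv track=rewrite | github.com/hyeeun1031/coding-practice | 프로그래머스/1/258712. 가장 많이 받은 선물/가장 많이 받은 선물.py | solution
-- ===== SOURCE A (Python) =====
-- def solution(friends, gifts):
--     n = len(friends)
--
--     # 이름 → 인덱스
--     name_to_idx = {name: i for i, name in enumerate(friends)}
--
--     # 주고받은 횟수
--     give = [[0] * n for _ in range(n)]
--
--     # 선물 기록 반영
--     for g in gifts:
--         a, b = g.split()
--         i = name_to_idx[a]
--         j = name_to_idx[b]
--         give[i][j] += 1
--
--     # 선물 지수 계산
--     score = [0] * n
--     for i in range(n):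
--         for j in range(n):
--             score[i] += give[i][j]   # 준 것
--             score[i] -= give[j][i]   # 받은 것
--
--     # 다음 달 받을 선물 수
--     next_gift = [0] * n
--
--     # 모든 쌍 비교
--     for i in range(n):
--         for j in range(i + 1, n):
--
--             if give[i][j] > give[j][i]:
--                 next_gift[i] += 1
--             elif give[i][j] < give[j][i]:
--                 next_gift[j] += 1
--             else:
--                 # 선물 지수 비교
--                 if score[i] > score[j]:
--                     next_gift[i] += 1
--                 elif score[i] < score[j]:
--                     next_gift[j] += 1
--                 # 같으면 아무 일 없음
--
--     return max(next_gift)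
-- ===== SOURCE B (Python) =====
-- def solution(friends, gifts):
--     n = len(friends)
--     idx = {name: i for i, name in enumerate(friends)}
--
--     # one parsing pass: directed give-counts in a sparse dict, scores on the fly
--     give = {}
--     score = [0] * n
--     for g in gifts:
--         a, b = g.split()
--         i, j = idx[a], idx[b]
--         give[(i, j)] = give.get((i, j), 0) + 1
--         score[i] += 1
--         score[j] -= 1
--
--     # baseline: pretend every pair is tied on counts, so the score alone decides;
--     # then friend i beats exactly the friends with a strictly smaller score, and that
--     # number is the position of the first occurrence of score[i] in the sorted scores.
--     first_pos = {}
--     for k, v in enumerate(sorted(score)):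
--         if v not in first_pos:
--             first_pos[v] = k
--     wins = [first_pos[score[i]] for i in range(n)]
--
--     # correct only the pairs that actually exchanged gifts unevenly
--     for i, j in give:
--         if i > j and (j, i) in give:
--             continue  # this unordered pair is handled at its mirrored key
--         a, b = (i, j) if i <= j else (j, i)
--         gab, gba = give.get((a, b), 0), give.get((b, a), 0)
--         if gab != gba:
--             if score[a] > score[b]:
--                 wins[a] -= 1
--             elif score[b] > score[a]:
--                 wins[b] -= 1
--             if gab > gba:
--                 wins[a] += 1
--             else:
--                 wins[b] += 1
--     return max(wins)
-- ===== Notes on version B (the rewrite author's own statement) =====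
-- stated objective: alternative
-- what changed: B drops A's dense n-by-n matrix and triangular all-pairs comparison loop: it keeps a sparse dict of directed give-counts and the scores from one parsing pass, gets a baseline win count for every friend from the rank of its score in the sorted score list (as if all pairs were tied on counts), and then corrects only the pairs that actually exchanged gifts unevenly.
import Mathlib
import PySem

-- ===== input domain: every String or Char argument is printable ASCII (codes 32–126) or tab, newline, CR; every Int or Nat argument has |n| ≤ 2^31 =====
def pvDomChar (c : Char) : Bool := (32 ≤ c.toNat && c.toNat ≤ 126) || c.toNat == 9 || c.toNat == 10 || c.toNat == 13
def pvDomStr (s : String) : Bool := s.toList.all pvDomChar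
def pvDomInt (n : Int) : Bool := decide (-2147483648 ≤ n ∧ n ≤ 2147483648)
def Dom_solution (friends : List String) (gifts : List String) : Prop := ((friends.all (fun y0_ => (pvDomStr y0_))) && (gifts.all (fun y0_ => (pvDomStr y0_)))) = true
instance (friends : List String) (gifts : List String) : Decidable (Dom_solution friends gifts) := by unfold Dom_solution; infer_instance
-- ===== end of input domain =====

-- B replaces A's dense n×n matrix and triangular all-pairs comparison loop by a sparse
-- dict of directed give-counts, a baseline win count read off the rank of each score in
-- the sorted score list, and a correction pass over only the unevenly-gifted pairs
-- (objective: alternative algorithm).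

-- ===== PORT A =====
-- shared helper: both Pythons contain the identical name→index dict comprehension
def pvNameIdx (friends : List String) : PySem.Dict String Nat :=
  friends.zipIdx.foldl (fun d p => d.insert p.1 p.2) PySem.Dict.empty

def pvIdx (friends : List String) (a : String) : Nat :=
  ((pvNameIdx friends).get? a).getD 0      -- Pre_ guarantees a ∈ friends, so the default is never used

def pvG2 (m : List (List Int)) (i j : Nat) : Int := (m.getD i []).getD j 0

-- A-side: the gift-record loop building the n×n matrix
def pvGiveStep (friends : List String) (give : List (List Int)) (g : String) : List (List Int) :=
  match PySem.Str.split₀ g with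
  | [a, b] =>
    let i := pvIdx friends a
    let j := pvIdx friends b
    give.set i ((give.getD i []).set j ((give.getD i []).getD j 0 + 1))
  | _ => give     -- records that do not split into exactly two tokens raise in Python; excluded by Pre_

def pvGive (friends gifts : List String) : List (List Int) :=
  gifts.foldl (pvGiveStep friends) (List.replicate friends.length (List.replicate friends.length 0))

-- A-side: the separate n×n score scan
def pvScoreA (give : List (List Int)) (n : Nat) : List Int :=
  (List.range n).foldl (fun score i =>
    (List.range n).foldl (fun score j =>
      let s1 := score.set i (score.getD i 0 + pvG2 give i j)
      s1.set i (s1.getD i 0 - pvG2 give j i)) score)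
    (List.replicate n 0)

-- A-side: the triangular all-pairs loop mutating next_gift
def pvNextA (give : List (List Int)) (score : List Int) (n : Nat) : List Int :=
  (List.range n).foldl (fun ng i =>
    (List.range' (i+1) (n - (i+1))).foldl (fun ng j =>
      if pvG2 give i j > pvG2 give j i then ng.set i (ng.getD i 0 + 1)
      else if pvG2 give i j < pvG2 give j i then ng.set j (ng.getD j 0 + 1)
      else if score.getD i 0 > score.getD j 0 then ng.set i (ng.getD i 0 + 1)
      else if score.getD i 0 < score.getD j 0 then ng.set j (ng.getD j 0 + 1)
      else ng) ng)
    (List.replicate n 0)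

def solution (friends : List String) (gifts : List String) : Int :=
  let n := friends.length
  let give := pvGive friends gifts
  let score := pvScoreA give n
  let next := pvNextA give score n
  (PySem.List.max? next (fun x => x)).getD 0     -- Pre_ has friends ≠ [], so max? is some

-- ===== PORT B =====
-- B-side: one parsing pass carrying (sparse give-dict, score)
def pvStepB (friends : List String) (gs : PySem.Dict (Nat × Nat) Int × List Int) (g : String) :
    PySem.Dict (Nat × Nat) Int × List Int :=
  match PySem.Str.split₀ g with
  | [a, b] =>
    let i := pvIdx friends a
    let j := pvIdx friends b
    let d := gs.1.insert (i, j) (gs.1.getD (i, j) 0 + 1)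
    let s1 := gs.2.set i (gs.2.getD i 0 + 1)
    (d, s1.set j (s1.getD j 0 - 1))
  | _ => gs

-- B-side: first_pos[v] = position of the first occurrence of v in the sorted score list
def pvFirstPos (ss : List Int) : PySem.Dict Int Int :=
  (PySem.List.enumerate ss 0).foldl
    (fun d p => if d.contains p.2 then d else d.insert p.2 p.1) PySem.Dict.empty

-- B-side: the correction body for the normalised pair (a, b)
def pvCorrAB (give : PySem.Dict (Nat × Nat) Int) (score : List Int)
    (wins : List Int) (a b : Nat) : List Int :=
  if give.getD (a, b) 0 ≠ give.getD (b, a) 0 then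
    let w1 :=
      if score.getD a 0 > score.getD b 0 then wins.set a (wins.getD a 0 - 1)
      else if score.getD b 0 > score.getD a 0 then wins.set b (wins.getD b 0 - 1)
      else wins
    if give.getD (a, b) 0 > give.getD (b, a) 0 then w1.set a (w1.getD a 0 + 1)
    else w1.set b (w1.getD b 0 + 1)
  else wins

-- B-side: one correction step for a key of the give-dict
def pvCorrStep (give : PySem.Dict (Nat × Nat) Int) (score : List Int)
    (wins : List Int) (p : Nat × Nat) : List Int :=
  if p.1 > p.2 ∧ give.contains (p.2, p.1) = true then wins   -- this unordered pair is handled at its mirrored key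
  else pvCorrAB give score wins (if p.1 ≤ p.2 then p.1 else p.2) (if p.1 ≤ p.2 then p.2 else p.1)

def solution_alt (friends : List String) (gifts : List String) : Int :=
  let n := friends.length
  let gs := gifts.foldl (pvStepB friends) (PySem.Dict.empty, List.replicate n 0)
  let fp := pvFirstPos (PySem.List.sorted gs.2 (fun x => x) false)
  let wins0 := (List.range n).map (fun i => (fp.get? (gs.2.getD i 0)).getD 0)
    -- Pre_ guarantees score[i] occurs in the sorted scores, so the lookup never raises
  let wins := gs.1.keys.foldl (pvCorrStep gs.1 gs.2) wins0
  (PySem.List.max? wins (fun x => x)).getD 0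

-- ===== PRECONDITION & SPEC =====
-- Pre_ excludes exactly the inputs where A raises: empty friends (max of an empty list,
-- ValueError) and gift records that do not split into two names both present in friends
-- (ValueError on unpacking / KeyError).
def Pre_solution (friends : List String) (gifts : List String) : Prop :=
  friends ≠ [] ∧
  gifts.all (fun g => match PySem.Str.split₀ g with
    | [a, b] => friends.contains a && friends.contains b
    | _ => false) = true
instance (friends : List String) (gifts : List String) : Decidable (Pre_solution friends gifts) := by unfold Pre_solution; infer_instance

def pvWitness_solution : List String × List String := (["muzi", "ryan"], ["muzi ryan", "ryan muzi", "muzi ryan"])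

def Spec_solution (friends : List String) (gifts : List String) (out : Int) : Prop := out = solution_alt friends gifts
instance (friends : List String) (gifts : List String) (out : Int) : Decidable (Spec_solution friends gifts out) := by unfold Spec_solution; infer_instance

-- ===== CLAIM (what is proved, stated in full; the proofs are below) =====
def Claim_equal_solution : Prop := ∀ (friends : List String) (gifts : List String), Dom_solution friends gifts → Pre_solution friends gifts → Spec_solution friends gifts (solution friends gifts)

-- ===== LEMMAS AND PROOFS =====

theorem solution_witness_ok : Dom_solution pvWitness_solution.1 pvWitness_solution.2 ∧ Pre_solution pvWitness_solution.1 pvWitness_solution.2 := by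
  constructor <;> decide

-- ---------- proof-only semantic layer: the parsed event list ----------
def pvEvents (friends gifts : List String) : List (Nat × Nat) :=
  gifts.filterMap (fun g => match PySem.Str.split₀ g with
    | [a, b] => some (pvIdx friends a, pvIdx friends b)
    | _ => none)

def pvCnt (E : List (Nat × Nat)) (i j : Nat) : Int := (E.count (i, j) : Int)

def pvScE (E : List (Nat × Nat)) (n k : Nat) : Int :=
  ((List.range n).map (fun x => pvCnt E k x - pvCnt E x k)).sum

def pvWinE (E : List (Nat × Nat)) (n i j : Nat) : Bool :=
  decide (pvCnt E i j > pvCnt E j i) ||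
  (decide (pvCnt E i j = pvCnt E j i) && decide (pvScE E n i > pvScE E n j))

def pvTarget (friends gifts : List String) : List Int :=
  (List.range friends.length).map (fun i =>
    (((List.range friends.length).countP (pvWinE (pvEvents friends gifts) friends.length i) : Nat) : Int))


-- ---------- generic list lemma used throughout ----------
theorem pv_getD_set {α : Type} (l : List α) (i k : Nat) (v d : α) :
    (l.set i v).getD k d = if i = k ∧ i < l.length then v else l.getD k d := by
  rw [List.getD_eq_getElem?_getD, List.getElem?_set, List.getD_eq_getElem?_getD]
  by_cases h1 : i = k
  · subst h1
    by_cases h2 : i < l.length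
    · simp [h2]
    · simp [h2]
  · simp [h1]

-- ---------- the shared name→index dict gives indices < n ----------
theorem pvNameIdx_aux (n : Nat) (l : List (String × Nat)) :
    ∀ (d : PySem.Dict String Nat), (∀ s v, d.get? s = some v → v < n) →
    (∀ p ∈ l, p.2 < n) →
    ∀ s v, (l.foldl (fun d p => d.insert p.1 p.2) d).get? s = some v → v < n := by
  induction l with
  | nil => intro d hd _ s v h; exact hd s v h
  | cons p t ih =>
    intro d hd hm s v h
    refine ih _ (fun s v hv => ?_) (fun q hq => hm q (List.mem_cons_of_mem _ hq)) s v h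
    rw [PySem.Dict.get?_insert] at hv
    split at hv
    · cases hv; exact hm p (List.mem_cons_self)
    · exact hd _ _ hv

theorem pvIdx_lt (friends : List String) (a : String) (h : 0 < friends.length) :
    pvIdx friends a < friends.length := by
  unfold pvIdx
  cases hg : (pvNameIdx friends).get? a with
  | none => simpa using h
  | some v =>
    have := pvNameIdx_aux friends.length friends.zipIdx PySem.Dict.empty
      (by intro s v hv; simp [PySem.Dict.get?, PySem.Dict.empty] at hv)
      (by intro p hp
          obtain ⟨x, i⟩ := p
          have := List.mem_zipIdx (k := 0) hp
          simpa using this.2.1)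
      a v (by simpa [pvNameIdx] using hg)
    simpa using this

-- ---------- A's score scan ----------
def pvSd (give : List (List Int)) (n k : Nat) : Int :=
  ((List.range n).map (fun x => pvG2 give k x - pvG2 give x k)).sum

theorem scoreA_inner (give : List (List Int)) (i : Nat) (js : List Nat) :
    ∀ (score : List Int), i < score.length →
    js.foldl (fun score j =>
        let s1 := score.set i (score.getD i 0 + pvG2 give i j)
        s1.set i (s1.getD i 0 - pvG2 give j i)) score
      = score.set i (score.getD i 0 + (js.map (fun j => pvG2 give i j - pvG2 give j i)).sum) := by
  induction js with
  | nil =>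
    intro score h
    simp only [List.foldl_nil, List.map_nil, List.sum_nil, add_zero]
    rw [List.getD_eq_getElem _ 0 h, List.set_getElem_self h]
  | cons j t ih =>
    intro score h
    simp only [List.foldl_cons, List.map_cons, List.sum_cons]
    rw [pv_getD_set]
    rw [if_pos ⟨rfl, h⟩, List.set_set]
    rw [ih _ (by simpa using h)]
    rw [pv_getD_set, if_pos ⟨rfl, by simpa using h⟩, List.set_set]
    congr 1
    ring

theorem scoreA_fold (give : List (List Int)) (n : Nat) (is : List Nat) :
    ∀ (score : List Int), score.length = n → (∀ i ∈ is, i < n) → is.Nodup →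
    (is.foldl (fun score i =>
      (List.range n).foldl (fun score j =>
        let s1 := score.set i (score.getD i 0 + pvG2 give i j)
        s1.set i (s1.getD i 0 - pvG2 give j i)) score) score).length = n ∧
    ∀ k, (is.foldl (fun score i =>
      (List.range n).foldl (fun score j =>
        let s1 := score.set i (score.getD i 0 + pvG2 give i j)
        s1.set i (s1.getD i 0 - pvG2 give j i)) score) score).getD k 0
      = if k ∈ is then score.getD k 0 + pvSd give n k else score.getD k 0 := by
  induction is with
  | nil => intro score hl _ _; simpa using hl
  | cons i t ih =>
    intro score hl hm hnd
    have hi : i < score.length := by rw [hl]; exact hm i List.mem_cons_self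
    simp only [List.foldl_cons]
    rw [scoreA_inner give i (List.range n) score hi]
    obtain ⟨ihl, ihd⟩ := ih (score.set i (score.getD i 0 + ((List.range n).map (fun j => pvG2 give i j - pvG2 give j i)).sum))
      (by simpa using hl) (fun x hx => hm x (List.mem_cons_of_mem _ hx)) hnd.of_cons
    refine ⟨ihl, fun k => ?_⟩
    rw [ihd k]
    by_cases hk : k ∈ t
    · have hki : k ≠ i := fun h => (List.nodup_cons.mp hnd).1 (h ▸ hk)
      rw [if_pos hk, pv_getD_set, if_neg (fun h => hki h.1.symm),
        if_pos (List.mem_cons_of_mem i hk)]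
    · by_cases hki : k = i
      · subst hki
        rw [if_neg hk, pv_getD_set, if_pos ⟨rfl, hi⟩, if_pos List.mem_cons_self]
        rfl
      · rw [if_neg hk, pv_getD_set, if_neg (fun h => hki h.1.symm),
          if_neg (by simp [hki, hk])]

theorem scoreA_getD (give : List (List Int)) (n : Nat) (k : Nat) (hk : k < n) :
    (pvScoreA give n).getD k 0 = pvSd give n k :=
  ((scoreA_fold give n (List.range n) (List.replicate n 0) (by simp) (by simp) List.nodup_range).2 k).trans
    (by simp [hk])

-- ---------- A's triangular pair loop, characterised per position ----------
def pvWins (give : List (List Int)) (score : List Int) (i j : Nat) : Bool :=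
  decide (pvG2 give i j > pvG2 give j i) ||
  (decide (pvG2 give i j = pvG2 give j i) && decide (score.getD i 0 > score.getD j 0))

def pvBump (l : List Int) (k : Nat) : List Int := l.set k (l.getD k 0 + 1)

def pvPairStep (give : List (List Int)) (score : List Int) (ng : List Int) (p : Nat × Nat) : List Int :=
  if pvWins give score p.1 p.2 then pvBump ng p.1
  else if pvWins give score p.2 p.1 then pvBump ng p.2 else ng

def pvPWin (give : List (List Int)) (score : List Int) (k : Nat) (p : Nat × Nat) : Bool :=
  (pvWins give score p.1 p.2 && (p.1 == k)) ||
  (!(pvWins give score p.1 p.2) && pvWins give score p.2 p.1 && (p.2 == k))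

theorem pvWins_asymm (give : List (List Int)) (score : List Int) (i j : Nat)
    (h : pvWins give score i j = true) : pvWins give score j i = false := by
  unfold pvWins at *
  simp only [Bool.or_eq_true, Bool.and_eq_true, decide_eq_true_eq] at h
  simp only [Bool.or_eq_false_iff, Bool.and_eq_false_iff, decide_eq_false_iff_not]
  constructor <;> omega

theorem pvWins_irrefl (give : List (List Int)) (score : List Int) (i : Nat) :
    pvWins give score i i = false := by
  unfold pvWins
  simp

theorem stepA_eq (give : List (List Int)) (score : List Int) (ng : List Int) (i j : Nat) :
    (if pvG2 give i j > pvG2 give j i then ng.set i (ng.getD i 0 + 1)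
     else if pvG2 give i j < pvG2 give j i then ng.set j (ng.getD j 0 + 1)
     else if score.getD i 0 > score.getD j 0 then ng.set i (ng.getD i 0 + 1)
     else if score.getD i 0 < score.getD j 0 then ng.set j (ng.getD j 0 + 1)
     else ng)
    = pvPairStep give score ng (i, j) := by
  unfold pvPairStep pvWins pvBump
  simp only [Bool.or_eq_true, Bool.and_eq_true, decide_eq_true_eq]
  split_ifs <;> first | rfl | omega

theorem pairs_fold (give : List (List Int)) (score : List Int) (ps : List (Nat × Nat)) :
    ∀ ng : List Int, (∀ p ∈ ps, p.1 < ng.length ∧ p.2 < ng.length) →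
    (ps.foldl (pvPairStep give score) ng).length = ng.length ∧
    ∀ k, (ps.foldl (pvPairStep give score) ng).getD k 0
        = ng.getD k 0 + (ps.countP (pvPWin give score k) : Int) := by
  induction ps with
  | nil => intro ng _; simp
  | cons p t ih =>
    intro ng h
    have hp := h p List.mem_cons_self
    have hlen : (pvPairStep give score ng p).length = ng.length := by
      unfold pvPairStep pvBump; split_ifs <;> simp
    obtain ⟨ihl, ihd⟩ := ih (pvPairStep give score ng p)
      (by rw [hlen]; exact fun q hq => h q (List.mem_cons_of_mem _ hq))
    refine ⟨by rw [List.foldl_cons, ihl, hlen], fun k => ?_⟩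
    rw [List.foldl_cons, ihd k, List.countP_cons]
    have hstep : (pvPairStep give score ng p).getD k 0
        = ng.getD k 0 + (if pvPWin give score k p then (1 : Int) else 0) := by
      unfold pvPairStep pvPWin pvBump
      by_cases h1 : pvWins give score p.1 p.2
      · rw [if_pos h1, pv_getD_set]
        by_cases hk : p.1 = k
        · subst hk; rw [if_pos ⟨rfl, hp.1⟩]; simp [h1]
        · rw [if_neg (fun hc => hk hc.1)]; simp [h1, hk]
      · rw [if_neg h1]
        by_cases h2 : pvWins give score p.2 p.1
        · rw [if_pos h2, pv_getD_set]
          by_cases hk : p.2 = k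
          · subst hk; rw [if_pos ⟨rfl, hp.2⟩]; simp [h1, h2]
          · rw [if_neg (fun hc => hk hc.1)]; simp [h1, h2, hk]
        · simp [h1, h2]
    rw [hstep]
    by_cases hw : pvPWin give score k p <;> simp [hw] <;> push_cast <;> ring

theorem foldl_flatMap_eq {α β σ : Type} (g : α → List β) (f : σ → β → σ) (l : List α) :
    ∀ init, (l.flatMap g).foldl f init = l.foldl (fun acc x => (g x).foldl f acc) init := by
  induction l with
  | nil => intro init; rfl
  | cons x t ih => intro init; simp [List.flatMap_cons, List.foldl_append, ih]

def pvPairs (n : Nat) : List (Nat × Nat) :=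
  (List.range n).flatMap (fun i => (List.range' (i+1) (n-(i+1))).map (fun j => (i, j)))

theorem nextA_eq_pairs (give : List (List Int)) (score : List Int) (n : Nat) :
    pvNextA give score n = (pvPairs n).foldl (pvPairStep give score) (List.replicate n 0) := by
  unfold pvNextA pvPairs
  rw [foldl_flatMap_eq]
  congr 1
  funext ng i
  rw [List.foldl_map]
  congr 1
  funext ng j
  exact stepA_eq give score ng i j

theorem sum_ite_nat {α : Type} (p : α → Bool) (l : List α) :
    (l.map (fun x => if p x = true then (1 : Nat) else 0)).sum = l.countP p := by
  induction l with
  | nil => rfl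
  | cons x t ih => by_cases h : p x <;> simp [h, ih] <;> omega

theorem countP_pairs (give : List (List Int)) (score : List Int) (n k : Nat) (hk : k < n) :
    (pvPairs n).countP (pvPWin give score k)
      = (List.range n).countP (fun j => pvWins give score k j) := by
  have hsplit : List.range n = List.range k ++ k :: List.range' (k+1) (n-(k+1)) := by
    rw [List.range_eq_range', List.range_eq_range']
    have h1 : k :: List.range' (k+1) (n-(k+1)) = List.range' k ((n-(k+1))+1) :=
      (List.range'_succ).symm
    rw [h1]
    have h2 := List.range'_append (s := 0) (m := k) (n := (n-(k+1))+1) (step := 1)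
    simp only [Nat.zero_add, Nat.one_mul] at h2
    rw [h2]
    congr 1
    omega
  have hkblock : ((List.range' (k+1) (n-(k+1))).map (fun j => (k, j))).countP (pvPWin give score k)
      = (List.range' (k+1) (n-(k+1))).countP (fun j => pvWins give score k j) := by
    rw [List.countP_map]
    refine List.countP_congr (fun j hj => ?_)
    have hjk : j ≠ k := by have := List.mem_range'_1.mp hj; omega
    unfold pvPWin
    simp [hjk]
  have hlow : ∀ i, i < k → ((List.range' (i+1) (n-(i+1))).map (fun j => (i, j))).countP (pvPWin give score k)
      = if pvWins give score k i then 1 else 0 := by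
    intro i hik
    rw [List.countP_map]
    have hineqk : i ≠ k := by omega
    have hq : ∀ x ∈ List.range' (i+1) (n-(i+1)),
        ((pvPWin give score k ∘ fun j => (i, j)) x = true ↔ ((x == k) && pvWins give score k i) = true) := by
      intro x hx
      unfold pvPWin
      by_cases hxk : x = k
      · subst hxk
        by_cases hw : pvWins give score x i
        · simp [hw, pvWins_asymm _ _ _ _ hw]
        · simp [hineqk, hw]
      · simp [hineqk, hxk]
    rw [List.countP_congr hq]
    by_cases hw : pvWins give score k i
    · simp only [hw, Bool.and_true]
      have hkmem : k ∈ List.range' (i+1) (n-(i+1)) := List.mem_range'_1.mpr (by omega)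
      have hcnt : (List.range' (i+1) (n-(i+1))).countP (fun x => x == k)
          = (List.range' (i+1) (n-(i+1))).count k := by
        simp [List.count]
      rw [hcnt, List.count_eq_one_of_mem (List.nodup_range' 1) hkmem]
      simp
    · simp [hw]
  have hhigh : ∀ i, k < i → ((List.range' (i+1) (n-(i+1))).map (fun j => (i, j))).countP (pvPWin give score k)
      = 0 := by
    intro i hik
    rw [List.countP_map, List.countP_eq_zero]
    intro j hj
    have hjk : j ≠ k := by have := List.mem_range'_1.mp hj; omega
    have hineqk : i ≠ k := by omega
    unfold pvPWin
    simp [hineqk, hjk]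
  unfold pvPairs
  rw [List.countP_flatMap]
  simp only [Function.comp_def]
  conv_lhs => rw [hsplit]
  conv_rhs => rw [hsplit]
  rw [List.map_append, List.sum_append, List.map_cons, List.sum_cons,
      List.countP_append, List.countP_cons, pvWins_irrefl]
  rw [List.map_congr_left (fun i hi => hlow i (List.mem_range.mp hi)),
      List.map_congr_left (fun i hi => hhigh i (by have := List.mem_range'_1.mp hi; omega)),
      hkblock, sum_ite_nat]
  simp

theorem pairs_mem_lt (n : Nat) : ∀ p ∈ pvPairs n, p.1 < n ∧ p.2 < n := by
  intro p hp
  unfold pvPairs at hp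
  simp only [List.mem_flatMap, List.mem_map, List.mem_range] at hp
  obtain ⟨i, hi, j, hj, rfl⟩ := hp
  have := List.mem_range'_1.mp hj
  constructor <;> simp <;> omega

theorem nextA_length (give : List (List Int)) (score : List Int) (n : Nat) :
    (pvNextA give score n).length = n := by
  rw [nextA_eq_pairs,
    (pairs_fold give score (pvPairs n) (List.replicate n 0)
      (by simpa using pairs_mem_lt n)).1]
  simp

theorem nextA_getD (give : List (List Int)) (score : List Int) (n k : Nat) (hk : k < n) :
    (pvNextA give score n).getD k 0
      = (((List.range n).countP (fun j => pvWins give score k j) : Nat) : Int) := by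
  rw [nextA_eq_pairs,
    (pairs_fold give score (pvPairs n) (List.replicate n 0)
      (by simpa using pairs_mem_lt n)).2 k,
    countP_pairs give score n k hk]
  simp

-- ---------- matrix shape / update lemmas ----------
def pvShaped (n : Nat) (give : List (List Int)) : Prop :=
  give.length = n ∧ ∀ r ∈ give, r.length = n

theorem sum_map_sub_int {α : Type} (l : List α) (f g : α → Int) :
    (l.map (fun x => f x - g x)).sum = (l.map f).sum - (l.map g).sum := by
  induction l with
  | nil => simp
  | cons x t ih => simp [ih]; ring

theorem sum_indicator_int (n j : Nat) :
    ((List.range n).map (fun x => if x = j then (1 : Int) else 0)).sum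
      = if j < n then 1 else 0 := by
  induction n with
  | zero => simp
  | succ n ih =>
    rw [List.range_succ, List.map_append, List.sum_append, ih]
    simp only [List.map_cons, List.map_nil, List.sum_cons, List.sum_nil]
    split_ifs <;> omega

theorem row_length (n : Nat) (give : List (List Int)) (hs : pvShaped n give) (i : Nat)
    (hi : i < n) : (give.getD i []).length = n := by
  rw [List.getD_eq_getElem _ _ (by rw [hs.1]; exact hi : i < give.length)]
  exact hs.2 _ (List.getElem_mem _)

theorem shaped_update (n : Nat) (give : List (List Int)) (hs : pvShaped n give)
    (i j : Nat) (hi : i < n) (v : Int) :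
    pvShaped n (give.set i ((give.getD i []).set j v)) := by
  refine ⟨by simp [hs.1], fun r hr => ?_⟩
  rcases List.mem_or_eq_of_mem_set hr with h | h
  · exact hs.2 r h
  · subst h
    rw [List.length_set]
    exact row_length n give hs i hi

theorem pvG2_update (n : Nat) (give : List (List Int)) (hs : pvShaped n give)
    (i j : Nat) (hi : i < n) (hj : j < n) (x y : Nat) :
    pvG2 (give.set i ((give.getD i []).set j ((give.getD i []).getD j 0 + 1))) x y
      = pvG2 give x y + (if x = i ∧ y = j then 1 else 0) := by
  have hgl := hs.1
  unfold pvG2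
  rw [pv_getD_set]
  by_cases hx : x = i
  · subst hx
    rw [if_pos ⟨rfl, by rw [hgl]; exact hi⟩, pv_getD_set, row_length n give hs x hi]
    by_cases hy : y = j
    · subst hy; rw [if_pos ⟨rfl, hj⟩]; simp
    · rw [if_neg (fun hc => hy hc.1.symm)]; simp [hy]
  · rw [if_neg (fun hc => hx hc.1.symm)]
    simp [hx]

theorem zero_shaped (n : Nat) : pvShaped n (List.replicate n (List.replicate n (0 : Int))) :=
  ⟨by simp, fun r hr => by rw [List.eq_of_mem_replicate hr]; simp⟩

theorem pvG2_zero (n x y : Nat) : pvG2 (List.replicate n (List.replicate n (0 : Int))) x y = 0 := by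
  unfold pvG2
  by_cases hx : x < n
  · rw [List.getD_replicate _ hx]
    by_cases hy : y < n
    · rw [List.getD_replicate _ hy]
    · rw [List.getD_eq_default _ _ (by simpa using hy)]
  · rw [show (List.replicate n (List.replicate n (0:Int))).getD x [] = [] from
      List.getD_eq_default _ _ (by simpa using hx)]
    simp [List.getD]

theorem scoreB_getD (score : List Int) (i j k : Nat) (hi : i < score.length) (hj : j < score.length) :
    ((score.set i (score.getD i 0 + 1)).set j
        ((score.set i (score.getD i 0 + 1)).getD j 0 - 1)).getD k 0
      = score.getD k 0 + (if k = i then 1 else 0) - (if k = j then 1 else 0) := by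
  simp only [pv_getD_set, List.length_set]
  by_cases h1 : i = k
  · subst h1
    by_cases h2 : j = i
    · subst h2; split_ifs <;> omega
    · split_ifs <;> omega
  · by_cases h2 : j = k
    · subst h2
      by_cases h3 : i = j
      · subst h3; split_ifs <;> omega
      · split_ifs <;> omega
    · by_cases h3 : i = j
      · subst h3; split_ifs <;> omega
      · split_ifs <;> omega



-- ---------- reduction of both gift loops to the parsed event list ----------
def pvGiveStepE (give : List (List Int)) (e : Nat × Nat) : List (List Int) :=
  give.set e.1 ((give.getD e.1 []).set e.2 ((give.getD e.1 []).getD e.2 0 + 1))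

theorem giveA_events (friends : List String) (gifts : List String) :
    ∀ m : List (List Int),
      gifts.foldl (pvGiveStep friends) m = (pvEvents friends gifts).foldl pvGiveStepE m := by
  induction gifts with
  | nil => intro m; rfl
  | cons g t ih =>
    intro m
    show t.foldl _ (pvGiveStep friends m g) = (pvEvents friends (g :: t)).foldl pvGiveStepE m
    unfold pvEvents
    rw [List.filterMap_cons]
    rcases hs : PySem.Str.split₀ g with (_ | ⟨a, (_ | ⟨b, (_ | ⟨c, r⟩)⟩)⟩) <;>
      simp only [pvGiveStep, pvGiveStepE, hs, List.foldl_cons] <;> exact ih _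

def pvSStep (s : List Int) (e : Nat × Nat) : List Int :=
  let s1 := s.set e.1 (s.getD e.1 0 + 1)
  s1.set e.2 (s1.getD e.2 0 - 1)

def pvDStep (d : PySem.Dict (Nat × Nat) Int) (e : Nat × Nat) : PySem.Dict (Nat × Nat) Int :=
  d.insert e (d.getD e 0 + 1)

theorem stepB_events (friends : List String) (gifts : List String) :
    ∀ (d : PySem.Dict (Nat × Nat) Int) (s : List Int),
      gifts.foldl (pvStepB friends) (d, s)
        = ((pvEvents friends gifts).foldl pvDStep d, (pvEvents friends gifts).foldl pvSStep s) := by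
  induction gifts with
  | nil => intro d s; rfl
  | cons g t ih =>
    intro d s
    show t.foldl _ (pvStepB friends (d, s) g) = _
    unfold pvEvents
    rw [List.filterMap_cons]
    rcases hs : PySem.Str.split₀ g with (_ | ⟨a, (_ | ⟨b, (_ | ⟨c, r⟩)⟩)⟩) <;>
      simp only [pvStepB, pvDStep, pvSStep, hs, List.foldl_cons] <;> exact ih _ _

theorem pvEvents_lt (friends gifts : List String) (hn : 0 < friends.length) :
    ∀ e ∈ pvEvents friends gifts, e.1 < friends.length ∧ e.2 < friends.length := by
  intro e he
  unfold pvEvents at he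
  rw [List.mem_filterMap] at he
  obtain ⟨g, _, hg⟩ := he
  rcases hs : PySem.Str.split₀ g with (_ | ⟨a, (_ | ⟨b, (_ | ⟨c, r⟩)⟩)⟩) <;>
    rw [hs] at hg
  · exact absurd hg (by simp)
  · exact absurd hg (by simp)
  · cases hg; exact ⟨pvIdx_lt friends a hn, pvIdx_lt friends b hn⟩
  · exact absurd hg (by simp)

-- ---------- A's matrix entries are the event counts ----------
theorem giveE_fold (n : Nat) (E : List (Nat × Nat)) (hE : ∀ e ∈ E, e.1 < n ∧ e.2 < n) :
    ∀ m : List (List Int), pvShaped n m →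
      pvShaped n (E.foldl pvGiveStepE m) ∧
      ∀ i j, i < n → j < n →
        pvG2 (E.foldl pvGiveStepE m) i j = pvG2 m i j + pvCnt E i j := by
  induction E with
  | nil =>
    intro m hm
    refine ⟨hm, fun i j _ _ => ?_⟩
    simp [pvCnt]
  | cons e t ih =>
    intro m hm
    have he := hE e List.mem_cons_self
    obtain ⟨ihs, ihd⟩ := ih (fun x hx => hE x (List.mem_cons_of_mem _ hx))
      (pvGiveStepE m e) (shaped_update n m hm e.1 e.2 he.1 _)
    refine ⟨ihs, fun i j hi hj => ?_⟩
    rw [List.foldl_cons, ihd i j hi hj]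
    show pvG2 (pvGiveStepE m e) i j + pvCnt t i j = pvG2 m i j + pvCnt (e :: t) i j
    unfold pvGiveStepE
    rw [pvG2_update n m hm e.1 e.2 he.1 he.2 i j]
    unfold pvCnt
    rw [List.count_cons]
    have : (e == (i, j)) = decide (i = e.1 ∧ j = e.2) := by
      rcases e with ⟨e1, e2⟩
      by_cases h1 : i = e1 <;> by_cases h2 : j = e2 <;> simp [h1, h2] <;> omega
    rw [this]
    by_cases h : i = e.1 ∧ j = e.2 <;> simp [h] <;> push_cast <;> ring

theorem pvGive_cnt (friends gifts : List String) (hn : 0 < friends.length)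
    (i j : Nat) (hi : i < friends.length) (hj : j < friends.length) :
    pvG2 (pvGive friends gifts) i j = pvCnt (pvEvents friends gifts) i j := by
  unfold pvGive
  rw [giveA_events]
  rw [(giveE_fold friends.length (pvEvents friends gifts) (pvEvents_lt friends gifts hn) _
      (zero_shaped friends.length)).2 i j hi hj,
    pvG2_zero]
  ring

-- ---------- A's score is the event-based score ----------
theorem pvSd_eq_scE (friends gifts : List String) (hn : 0 < friends.length) (k : Nat) (hk : k < friends.length) :
    pvSd (pvGive friends gifts) friends.length k = pvScE (pvEvents friends gifts) friends.length k := by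
  unfold pvSd pvScE
  refine congrArg _ (List.map_congr_left fun x hx => ?_)
  have hxn := List.mem_range.mp hx
  rw [pvGive_cnt friends gifts hn k x hk hxn, pvGive_cnt friends gifts hn x k hxn hk]

-- ---------- A's port equals the target list ----------
theorem solutionA_target (friends gifts : List String) (hn : 0 < friends.length) :
    pvNextA (pvGive friends gifts) (pvScoreA (pvGive friends gifts) friends.length) friends.length
      = pvTarget friends gifts := by
  apply List.ext_getElem
  · rw [nextA_length]; simp [pvTarget]
  · intro k hk1 hk2
    have hkn : k < friends.length := by rwa [nextA_length] at hk1
    rw [← List.getD_eq_getElem _ 0 hk1, nextA_getD _ _ _ k hkn]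
    unfold pvTarget
    rw [List.getElem_map, List.getElem_range]
    congr 1
    apply List.countP_congr
    intro j hj
    have hjn : j < friends.length := List.mem_range.mp hj
    unfold pvWins pvWinE
    rw [pvGive_cnt friends gifts hn k j hkn hjn, pvGive_cnt friends gifts hn j k hjn hkn,
      scoreA_getD _ _ k hkn, scoreA_getD _ _ j hjn,
      pvSd_eq_scE friends gifts hn k hkn, pvSd_eq_scE friends gifts hn j hjn]


-- ---------- B's dict holds the event counts ----------
theorem dictB_getD (E : List (Nat × Nat)) (p : Nat × Nat) :
    (E.foldl pvDStep PySem.Dict.empty).getD p 0 = (E.count p : Int) := by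
  have hfun : pvDStep = (fun (d : PySem.Dict (Nat × Nat) Int) x => d.insert x (d.getD x 0 + 1)) := rfl
  rw [hfun, PySem.Dict.getD_foldl_insert_add_one, PySem.Dict.getD_empty]
  simp

theorem dictB_keys (E : List (Nat × Nat)) :
    (E.foldl pvDStep PySem.Dict.empty).keys = PySem.Set.ofList E := by
  have hfun : pvDStep = (fun (d : PySem.Dict (Nat × Nat) Int) x => d.insert x (d.getD x 0 + 1)) := rfl
  rw [hfun, PySem.Dict.keys_foldl_insert, PySem.Dict.keys_empty, PySem.Set.ofList_eq_foldl]
  rfl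

theorem dictB_contains (E : List (Nat × Nat)) (p : Nat × Nat) :
    (E.foldl pvDStep PySem.Dict.empty).contains p = true ↔ p ∈ E := by
  rw [PySem.Dict.contains_iff_mem_keys, dictB_keys, PySem.Set.mem_ofList]

theorem dictB_nodup (E : List (Nat × Nat)) :
    (E.foldl pvDStep PySem.Dict.empty).keys.Nodup := by
  rw [dictB_keys]; exact PySem.Set.nodup_ofList E

-- ---------- B's score list holds the event-based scores ----------
theorem sfold (E : List (Nat × Nat)) :
    ∀ s : List Int, (∀ e ∈ E, e.1 < s.length ∧ e.2 < s.length) →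
      (E.foldl pvSStep s).length = s.length ∧
      ∀ k, (E.foldl pvSStep s).getD k 0
        = s.getD k 0 + (E.map (fun e =>
            (if k = e.1 then (1 : Int) else 0) - (if k = e.2 then 1 else 0))).sum := by
  induction E with
  | nil => intro s _; simp
  | cons e t ih =>
    intro s hb
    have he := hb e List.mem_cons_self
    have hlen : (pvSStep s e).length = s.length := by
      unfold pvSStep; simp
    obtain ⟨ihl, ihd⟩ := ih (pvSStep s e)
      (by rw [hlen]; exact fun q hq => hb q (List.mem_cons_of_mem _ hq))
    refine ⟨by rw [List.foldl_cons, ihl, hlen], fun k => ?_⟩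
    rw [List.foldl_cons, ihd k]
    show (pvSStep s e).getD k 0 + _ = _
    unfold pvSStep
    rw [scoreB_getD s e.1 e.2 k he.1 he.2]
    simp only [List.map_cons, List.sum_cons]
    ring

theorem sum_pair_ind_fst (n : Nat) (e : Nat × Nat) (k : Nat) (h2 : e.2 < n) :
    ((List.range n).map (fun x => if e = (k, x) then (1 : Int) else 0)).sum
      = if e.1 = k then 1 else 0 := by
  rcases e with ⟨e1, e2⟩
  by_cases h : e1 = k
  · subst h
    rw [List.map_congr_left (fun x _ => by
      show (if (e1, e2) = (e1, x) then (1:Int) else 0) = if x = e2 then (1:Int) else 0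
      by_cases hx : x = e2 <;> simp [hx] <;> omega)]
    rw [sum_indicator_int, if_pos h2]
    simp
  · rw [List.map_congr_left (fun x _ => by
      show (if (e1, e2) = (k, x) then (1:Int) else 0) = 0
      simp [Prod.ext_iff, h])]
    simp [h]

theorem sum_pair_ind_snd (n : Nat) (e : Nat × Nat) (k : Nat) (h1 : e.1 < n) :
    ((List.range n).map (fun x => if e = (x, k) then (1 : Int) else 0)).sum
      = if e.2 = k then 1 else 0 := by
  rcases e with ⟨e1, e2⟩
  by_cases h : e2 = k
  · subst h
    rw [List.map_congr_left (fun x _ => by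
      show (if (e1, e2) = (x, e2) then (1:Int) else 0) = if x = e1 then (1:Int) else 0
      by_cases hx : x = e1 <;> simp [hx] <;> omega)]
    rw [sum_indicator_int, if_pos h1]
    simp
  · rw [List.map_congr_left (fun x _ => by
      show (if (e1, e2) = (x, k) then (1:Int) else 0) = 0
      simp [Prod.ext_iff, h])]
    simp [h]

theorem cnt_cons (e : Nat × Nat) (t : List (Nat × Nat)) (i j : Nat) :
    pvCnt (e :: t) i j = pvCnt t i j + (if e = (i, j) then 1 else 0) := by
  unfold pvCnt
  rw [List.count_cons]
  have : (e == (i, j)) = decide (e = (i, j)) := by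
    rcases e with ⟨e1, e2⟩
    by_cases h1 : e1 = i <;> by_cases h2 : e2 = j <;> simp [h1, h2, Prod.ext_iff]
  rw [this]
  by_cases h : e = (i, j) <;> simp [h]

theorem scE_sum (n : Nat) (E : List (Nat × Nat)) (hE : ∀ e ∈ E, e.1 < n ∧ e.2 < n) (k : Nat) :
    (E.map (fun e => (if k = e.1 then (1 : Int) else 0) - (if k = e.2 then 1 else 0))).sum
      = pvScE E n k := by
  induction E with
  | nil => simp [pvScE, pvCnt]
  | cons e t ih =>
    have he := hE e List.mem_cons_self
    have hcong : (List.range n).map (fun x => pvCnt (e :: t) k x - pvCnt (e :: t) x k)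
        = (List.range n).map (fun x => (pvCnt t k x - pvCnt t x k)
            + ((if e = (k, x) then (1:Int) else 0) - (if e = (x, k) then 1 else 0))) :=
      List.map_congr_left (fun x _ => by rw [cnt_cons, cnt_cons]; ring)
    rw [List.map_cons, List.sum_cons, ih (fun q hq => hE q (List.mem_cons_of_mem _ hq))]
    show _ = pvScE (e :: t) n k
    unfold pvScE
    rw [hcong, PySem.List.sum_map_add_int, sum_map_sub_int, sum_map_sub_int,
      sum_pair_ind_fst n e k he.2, sum_pair_ind_snd n e k he.1]
    have h1 : (if e.1 = k then (1:Int) else 0) = (if k = e.1 then 1 else 0) := by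
      by_cases h : e.1 = k <;> simp [h] <;> omega
    have h2 : (if e.2 = k then (1:Int) else 0) = (if k = e.2 then 1 else 0) := by
      by_cases h : e.2 = k <;> simp [h] <;> omega
    rw [h1, h2]
    ring

theorem scoreB_eq (n : Nat) (E : List (Nat × Nat)) (hE : ∀ e ∈ E, e.1 < n ∧ e.2 < n) :
    (E.foldl pvSStep (List.replicate n (0 : Int))).length = n ∧
    ∀ k, k < n → (E.foldl pvSStep (List.replicate n (0 : Int))).getD k 0 = pvScE E n k := by
  obtain ⟨hl, hd⟩ := sfold E (List.replicate n 0) (by simpa using hE)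
  refine ⟨by simpa using hl, fun k hk => ?_⟩
  rw [hd k, List.getD_replicate _ hk, scE_sum n E hE k]
  ring

-- ---------- the first-occurrence-position dict over the sorted scores ----------
theorem fp_fold_get? (t : List Int) :
    ∀ (m : Int) (d : PySem.Dict Int Int) (v : Int),
      ((PySem.List.enumerate t m).foldl
          (fun d p => if d.contains p.2 then d else d.insert p.2 p.1) d).get? v
        = if d.contains v = true then d.get? v
          else (PySem.List.index? t v).map (fun (k : Nat) => m + (k : Int)) := by
  induction t with
  | nil =>
    intro m d v
    rw [PySem.List.enumerate_nil]
    show d.get? v = _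
    by_cases hv : d.contains v
    · rw [if_pos hv]
    · rw [if_neg hv]
      rw [PySem.Dict.contains_eq_isSome_get?] at hv
      cases hg : d.get? v with
      | none => rw [PySem.List.index?_eq_idxOf?]; rfl
      | some w => rw [hg] at hv; simp at hv
  | cons x t ih =>
    intro m d v
    rw [PySem.List.enumerate_cons, List.foldl_cons]
    by_cases hc : d.contains x
    · rw [if_pos hc, ih (m + 1) d v]
      by_cases hv : d.contains v
      · rw [if_pos hv, if_pos hv]
      · rw [if_neg hv, if_neg hv]
        have hvx : x ≠ v := fun h => hv (h ▸ hc)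
        rw [PySem.List.index?_cons_of_ne _ hvx, Option.map_map]
        congr 1
        funext k
        simp only [Function.comp_apply]
        push_cast
        ring
    · rw [if_neg hc, ih (m + 1) (d.insert x m) v]
      by_cases hv : d.contains v
      · have hvx : v ≠ x := fun h => hc (h ▸ hv)
        rw [if_pos (by rw [PySem.Dict.contains_insert]; simp [hv]), if_pos hv,
          PySem.Dict.get?_insert_of_ne _ _ hvx]
      · by_cases hvx : v = x
        · subst hvx
          rw [if_pos (by rw [PySem.Dict.contains_insert]; simp), if_neg hv,
            PySem.Dict.get?_insert_self, PySem.List.index?_cons_self]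
          simp
        · rw [if_neg (by rw [PySem.Dict.contains_insert]; simp [hv, hvx]), if_neg hv,
            PySem.List.index?_cons_of_ne _ (fun h => hvx h.symm), Option.map_map]
          congr 1
          funext k
          simp only [Function.comp_apply]
          push_cast
          ring

theorem sorted_index? (ss : List Int) (hp : ss.Pairwise (· ≤ ·)) (v : Int) (hv : v ∈ ss) :
    PySem.List.index? ss v = some (ss.countP (fun x => decide (x < v))) := by
  induction ss with
  | nil => cases hv
  | cons x t ih =>
    rw [List.pairwise_cons] at hp
    by_cases hvx : x = v
    · subst hvx
      rw [PySem.List.index?_cons_self, List.countP_cons]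
      have ht : t.countP (fun y => decide (y < x)) = 0 :=
        List.countP_eq_zero.mpr (fun y hy => by
          simp only [decide_eq_true_eq, not_lt]
          exact hp.1 y hy)
      rw [ht]
      simp
    · have hvt : v ∈ t := by
        rcases List.mem_cons.mp hv with h | h
        · exact absurd h.symm hvx
        · exact h
      have hxv : x < v := lt_of_le_of_ne (hp.1 v hvt) hvx
      rw [PySem.List.index?_cons_of_ne _ hvx, ih hp.2 hvt, List.countP_cons]
      simp [hxv]

theorem fp_get (ss : List Int) (hp : ss.Pairwise (· ≤ ·)) (v : Int) (hv : v ∈ ss) :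
    (pvFirstPos ss).get? v = some ((ss.countP (fun x => decide (x < v)) : Nat) : Int) := by
  unfold pvFirstPos
  rw [fp_fold_get? ss 0 PySem.Dict.empty v, if_neg (by simp [PySem.Dict.contains_empty]),
    sorted_index? ss hp v hv]
  simp

theorem map_range_getD (l : List Int) :
    (List.range l.length).map (fun j => l.getD j 0) = l := by
  apply List.ext_getElem
  · simp
  · intro k h1 h2
    simp only [List.getElem_map, List.getElem_range, List.getD_eq_getElem?_getD]
    rw [List.getElem?_eq_getElem h2]
    rfl

theorem countP_range (l : List Int) (p : Int → Bool) :
    l.countP p = (List.range l.length).countP (fun j => p (l.getD j 0)) := by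
  conv_lhs => rw [← map_range_getD l]
  rw [List.countP_map]
  rfl


-- ---------- the correction pass, characterised additively ----------
def pvDeltaAB (give : PySem.Dict (Nat × Nat) Int) (score : List Int) (k a b : Nat) : Int :=
  if give.getD (a, b) 0 ≠ give.getD (b, a) 0 then
    (if score.getD a 0 > score.getD b 0 then (if k = a then (-1 : Int) else 0)
     else if score.getD b 0 > score.getD a 0 then (if k = b then (-1 : Int) else 0) else 0)
    + (if give.getD (a, b) 0 > give.getD (b, a) 0 then (if k = a then (1 : Int) else 0)
       else (if k = b then (1 : Int) else 0))
  else 0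

def pvDelta (give : PySem.Dict (Nat × Nat) Int) (score : List Int) (k : Nat) (p : Nat × Nat) : Int :=
  if p.1 > p.2 ∧ give.contains (p.2, p.1) = true then 0
  else pvDeltaAB give score k (if p.1 ≤ p.2 then p.1 else p.2) (if p.1 ≤ p.2 then p.2 else p.1)

theorem corrAB_length (give : PySem.Dict (Nat × Nat) Int) (score : List Int)
    (wins : List Int) (a b : Nat) : (pvCorrAB give score wins a b).length = wins.length := by
  unfold pvCorrAB
  split_ifs <;> first | rfl | simp

theorem getD_bump (l : List Int) (i : Nat) (hi : i < l.length) (v : Int) (k : Nat) :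
    (l.set i v).getD k 0 = if k = i then v else l.getD k 0 := by
  rw [pv_getD_set]
  by_cases h : i = k
  · subst h; rw [if_pos ⟨rfl, hi⟩, if_pos rfl]
  · rw [if_neg (fun hc => h hc.1), if_neg (fun hc => h hc.symm)]

theorem corrAB_getD (give : PySem.Dict (Nat × Nat) Int) (score : List Int)
    (wins : List Int) (a b : Nat) (ha : a < wins.length) (hb : b < wins.length) (k : Nat) :
    (pvCorrAB give score wins a b).getD k 0 = wins.getD k 0 + pvDeltaAB give score k a b := by
  unfold pvCorrAB pvDeltaAB
  by_cases hne : give.getD (a, b) 0 ≠ give.getD (b, a) 0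
  · rw [if_pos hne, if_pos hne]
    have hw1len : (if score.getD a 0 > score.getD b 0 then wins.set a (wins.getD a 0 - 1)
        else if score.getD b 0 > score.getD a 0 then wins.set b (wins.getD b 0 - 1)
        else wins).length = wins.length := by
      split_ifs <;> simp
    have hw1 : ∀ m, (if score.getD a 0 > score.getD b 0 then wins.set a (wins.getD a 0 - 1)
        else if score.getD b 0 > score.getD a 0 then wins.set b (wins.getD b 0 - 1)
        else wins).getD m 0
        = wins.getD m 0 + (if score.getD a 0 > score.getD b 0 then (if m = a then (-1 : Int) else 0)
            else if score.getD b 0 > score.getD a 0 then (if m = b then (-1 : Int) else 0) else 0) := by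
      intro m
      by_cases hs1 : score.getD a 0 > score.getD b 0
      · rw [if_pos hs1, if_pos hs1, getD_bump wins a ha _ m]
        by_cases h : m = a
        · subst h; simp only [eq_self_iff_true, if_true]; ring
        · simp only [if_neg h]; ring
      · rw [if_neg hs1, if_neg hs1]
        by_cases hs2 : score.getD b 0 > score.getD a 0
        · rw [if_pos hs2, if_pos hs2, getD_bump wins b hb _ m]
          by_cases h : m = b
          · subst h; simp only [eq_self_iff_true, if_true]; ring
          · simp only [if_neg h]; ring
        · rw [if_neg hs2, if_neg hs2]; ring
    by_cases hgt : give.getD (a, b) 0 > give.getD (b, a) 0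
    · rw [if_pos hgt, if_pos hgt, getD_bump _ a (by rw [hw1len]; exact ha) _ k]
      by_cases hka : k = a
      · subst hka; rw [hw1 k]; simp only [eq_self_iff_true, if_true]; ring
      · rw [hw1 k]; simp only [if_neg hka]; ring
    · rw [if_neg hgt, if_neg hgt, getD_bump _ b (by rw [hw1len]; exact hb) _ k]
      by_cases hkb : k = b
      · subst hkb; rw [hw1 k]; simp only [eq_self_iff_true, if_true]; ring
      · rw [hw1 k]; simp only [if_neg hkb]; ring
  · rw [if_neg hne, if_neg hne]
    ring

theorem corrStep_length (give : PySem.Dict (Nat × Nat) Int) (score : List Int)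
    (wins : List Int) (p : Nat × Nat) : (pvCorrStep give score wins p).length = wins.length := by
  unfold pvCorrStep
  by_cases h : p.1 > p.2 ∧ give.contains (p.2, p.1) = true
  · rw [if_pos h]
  · rw [if_neg h]; exact corrAB_length give score wins _ _

theorem corrStep_getD (give : PySem.Dict (Nat × Nat) Int) (score : List Int)
    (wins : List Int) (p : Nat × Nat) (h1 : p.1 < wins.length) (h2 : p.2 < wins.length) (k : Nat) :
    (pvCorrStep give score wins p).getD k 0 = wins.getD k 0 + pvDelta give score k p := by
  unfold pvCorrStep pvDelta
  by_cases h : p.1 > p.2 ∧ give.contains (p.2, p.1) = true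
  · rw [if_pos h, if_pos h]; ring
  · rw [if_neg h, if_neg h]
    by_cases hord : p.1 ≤ p.2
    · simp only [if_pos hord]; exact corrAB_getD give score wins p.1 p.2 h1 h2 k
    · simp only [if_neg hord]; exact corrAB_getD give score wins p.2 p.1 h2 h1 k

theorem corr_fold (give : PySem.Dict (Nat × Nat) Int) (score : List Int) (K : List (Nat × Nat)) :
    ∀ wins : List Int, (∀ p ∈ K, p.1 < wins.length ∧ p.2 < wins.length) →
      (K.foldl (pvCorrStep give score) wins).length = wins.length ∧
      ∀ k, (K.foldl (pvCorrStep give score) wins).getD k 0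
        = wins.getD k 0 + (K.map (pvDelta give score k)).sum := by
  induction K with
  | nil => intro wins _; simp
  | cons p t ih =>
    intro wins hb
    have hp := hb p List.mem_cons_self
    have hlen := corrStep_length give score wins p
    obtain ⟨ihl, ihd⟩ := ih (pvCorrStep give score wins p)
      (by rw [hlen]; exact fun q hq => hb q (List.mem_cons_of_mem _ hq))
    refine ⟨by rw [List.foldl_cons, ihl, hlen], fun k => ?_⟩
    rw [List.foldl_cons, ihd k, corrStep_getD give score wins p hp.1 hp.2 k,
      List.map_cons, List.sum_cons]
    ring

theorem sum_map_filter {α : Type} (p : α → Bool) (f : α → Int) (l : List α) :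
    ((l.filter p).map f).sum = (l.map (fun x => if p x = true then f x else 0)).sum := by
  induction l with
  | nil => rfl
  | cons x t ih =>
    rw [List.filter_cons]
    by_cases h : p x <;> simp [h, ih]

-- ordered per-endpoint contribution of an unevenly-gifted pair
def pvH (E : List (Nat × Nat)) (S : List Int) (k a b : Nat) : Int :=
  if pvCnt E a b ≠ pvCnt E b a ∧ k = a then
    (if pvCnt E a b > pvCnt E b a then 1 else 0) - (if S.getD a 0 > S.getD b 0 then 1 else 0)
  else 0

theorem deltaAB_eq_H (E : List (Nat × Nat)) (S : List Int) (k a b : Nat) :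
    pvDeltaAB (E.foldl pvDStep PySem.Dict.empty) S k a b
      = pvH E S k a b + pvH E S k b a := by
  unfold pvDeltaAB pvH pvCnt
  rw [dictB_getD E (a, b), dictB_getD E (b, a)]
  split_ifs <;> omega

def pvQ (E : List (Nat × Nat)) (k : Nat) (p : Nat × Nat) : Bool :=
  (!(decide (p.1 > p.2) && decide ((p.2, p.1) ∈ E)))
    && (decide (k = p.1) || decide (k = p.2))
    && decide (pvCnt E p.1 p.2 ≠ pvCnt E p.2 p.1)

theorem delta_pointwise (E : List (Nat × Nat)) (S : List Int) (k : Nat) (p : Nat × Nat) :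
    pvDelta (E.foldl pvDStep PySem.Dict.empty) S k p
      = if pvQ E k p then pvH E S k p.1 p.2 + pvH E S k p.2 p.1 else 0 := by
  unfold pvDelta pvQ
  have hcont : (E.foldl pvDStep PySem.Dict.empty).contains (p.2, p.1) = decide ((p.2, p.1) ∈ E) := by
    by_cases hm : (p.2, p.1) ∈ E
    · simp [hm, (dictB_contains E (p.2, p.1)).mpr hm]
    · simp only [hm, decide_false]
      by_cases hc : (E.foldl pvDStep PySem.Dict.empty).contains (p.2, p.1)
      · exact absurd ((dictB_contains E (p.2, p.1)).mp hc) hm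
      · simpa using hc
  rw [hcont]
  by_cases hskip : p.1 > p.2 ∧ decide ((p.2, p.1) ∈ E) = true
  · rw [if_pos hskip]
    have : (!(decide (p.1 > p.2) && decide ((p.2, p.1) ∈ E))) = false := by
      simp [hskip.1, hskip.2]
    rw [this]
    simp
  · rw [if_neg hskip, deltaAB_eq_H]
    have hsum : pvH E S k (if p.1 ≤ p.2 then p.1 else p.2) (if p.1 ≤ p.2 then p.2 else p.1)
        + pvH E S k (if p.1 ≤ p.2 then p.2 else p.1) (if p.1 ≤ p.2 then p.1 else p.2)
        = pvH E S k p.1 p.2 + pvH E S k p.2 p.1 := by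
      split_ifs <;> ring
    rw [hsum]
    by_cases hrel : ((decide (k = p.1) || decide (k = p.2))
        && decide (pvCnt E p.1 p.2 ≠ pvCnt E p.2 p.1)) = true
    · have : ((!(decide (p.1 > p.2) && decide ((p.2, p.1) ∈ E)))
          && (decide (k = p.1) || decide (k = p.2))
          && decide (pvCnt E p.1 p.2 ≠ pvCnt E p.2 p.1)) = true := by
        simp only [Bool.and_eq_true, Bool.or_eq_true, decide_eq_true_eq, Bool.not_eq_true',
          Bool.and_eq_false_iff] at *
        refine ⟨⟨?_, hrel.1⟩, hrel.2⟩
        by_cases hgt : p.1 > p.2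
        · right
          by_cases hm : (p.2, p.1) ∈ E
          · exact absurd ⟨hgt, by simp [hm]⟩ hskip
          · simp [hm]
        · left
          simpa using hgt
      rw [if_pos this]
    · have hz : pvH E S k p.1 p.2 + pvH E S k p.2 p.1 = 0 := by
        simp only [Bool.and_eq_true, Bool.or_eq_true, decide_eq_true_eq, not_and_or, not_or] at hrel
        unfold pvH
        rcases hrel with h | h
        · push_neg at h
          split_ifs <;> first | rfl | (exfalso; omega)
        · push_neg at h
          split_ifs <;> first | rfl | (exfalso; omega)
      by_cases hq : ((!(decide (p.1 > p.2) && decide ((p.2, p.1) ∈ E)))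
          && (decide (k = p.1) || decide (k = p.2))
          && decide (pvCnt E p.1 p.2 ≠ pvCnt E p.2 p.1)) = true
      · rw [if_pos hq, hz]
      · rw [if_neg hq, hz]


-- ---------- the correction deltas, summed over the dict keys ----------
def pvNorm (p : Nat × Nat) : Nat × Nat := (min p.1 p.2, max p.1 p.2)

theorem norm_cases (p q : Nat × Nat) (h : pvNorm p = pvNorm q) : p = q ∨ p = (q.2, q.1) := by
  rcases p with ⟨p1, p2⟩
  rcases q with ⟨q1, q2⟩
  simp only [pvNorm, Prod.mk.injEq] at h ⊢
  omega

theorem norm_swap (p : Nat × Nat) : pvNorm (p.2, p.1) = pvNorm p := by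
  simp [pvNorm, Nat.min_comm, Nat.max_comm]

def pvG (E : List (Nat × Nat)) (S : List Int) (k : Nat) (p : Nat × Nat) : Int :=
  pvH E S k p.1 p.2 + pvH E S k p.2 p.1

theorem pvG_norm (E : List (Nat × Nat)) (S : List Int) (k : Nat) (p : Nat × Nat) :
    pvG E S k (pvNorm p) = pvG E S k p := by
  rcases p with ⟨p1, p2⟩
  unfold pvG pvNorm
  by_cases h : p1 ≤ p2
  · rw [Nat.min_eq_left h, Nat.max_eq_right h]
  · rw [Nat.min_eq_right (by omega), Nat.max_eq_left (by omega)]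
    ring

theorem pvH_off (E : List (Nat × Nat)) (S : List Int) (k a b : Nat) (h : k ≠ a) :
    pvH E S k a b = 0 := by
  unfold pvH
  rw [if_neg (fun hc => h hc.2)]

theorem delta_sum (n : Nat) (E : List (Nat × Nat)) (hE : ∀ e ∈ E, e.1 < n ∧ e.2 < n)
    (S : List Int) (k : Nat) :
    (((E.foldl pvDStep PySem.Dict.empty).keys).map
        (pvDelta (E.foldl pvDStep PySem.Dict.empty) S k)).sum
      = ((List.range n).map (fun j => pvH E S k k j)).sum := by
  have hKmem : ∀ p, p ∈ (E.foldl pvDStep PySem.Dict.empty).keys ↔ p ∈ E := by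
    intro p
    rw [dictB_keys, PySem.Set.mem_ofList]
  have hKnd := dictB_nodup E
  have hQ_elim : ∀ p, pvQ E k p = true →
      (¬(p.1 > p.2 ∧ (p.2, p.1) ∈ E)) ∧ (k = p.1 ∨ k = p.2) ∧ pvCnt E p.1 p.2 ≠ pvCnt E p.2 p.1 := by
    intro p hp
    unfold pvQ at hp
    simp only [Bool.and_eq_true, Bool.or_eq_true, Bool.not_eq_true', Bool.and_eq_false_iff,
      decide_eq_true_eq, decide_eq_false_iff_not] at hp
    refine ⟨?_, hp.1.2, hp.2⟩
    rintro ⟨hgt, hmem⟩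
    rcases hp.1.1 with h | h
    · exact h hgt
    · exact h hmem
  have hQ_intro : ∀ p, (¬(p.1 > p.2 ∧ (p.2, p.1) ∈ E)) → (k = p.1 ∨ k = p.2) →
      pvCnt E p.1 p.2 ≠ pvCnt E p.2 p.1 → pvQ E k p = true := by
    intro p h1 h2 h3
    unfold pvQ
    simp only [Bool.and_eq_true, Bool.or_eq_true, Bool.not_eq_true', Bool.and_eq_false_iff,
      decide_eq_true_eq, decide_eq_false_iff_not]
    refine ⟨⟨?_, h2⟩, h3⟩
    by_cases hgt : p.1 > p.2
    · right; exact fun hm => h1 ⟨hgt, hm⟩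
    · left; exact hgt
  rw [List.map_congr_left (fun p _ => delta_pointwise E S k p),
    show (fun p => if pvQ E k p = true then pvH E S k p.1 p.2 + pvH E S k p.2 p.1 else 0)
      = (fun p => if pvQ E k p = true then pvG E S k p else 0) from rfl,
    ← sum_map_filter (pvQ E k) (pvG E S k)]
  have hstep3 : (((E.foldl pvDStep PySem.Dict.empty).keys.filter (pvQ E k)).map (pvG E S k))
      = ((((E.foldl pvDStep PySem.Dict.empty).keys.filter (pvQ E k)).map pvNorm).map (pvG E S k)) := by
    rw [List.map_map]
    exact List.map_congr_left (fun p _ => (pvG_norm E S k p).symm)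
  rw [hstep3]
  have hperm : (((E.foldl pvDStep PySem.Dict.empty).keys.filter (pvQ E k)).map pvNorm).Perm
      (((List.range n).filter (fun j => decide (j ≠ k) && decide (pvCnt E k j ≠ pvCnt E j k))).map
        (fun j => pvNorm (k, j))) := by
    apply List.perm_of_nodup_nodup_toFinset_eq
    · refine (hKnd.filter _).map_on ?_
      intro p hp q hq hnorm
      have hQp := hQ_elim p (List.mem_filter.mp hp).2
      have hQq := hQ_elim q (List.mem_filter.mp hq).2
      have hpE : p ∈ E := (hKmem p).mp (List.mem_filter.mp hp).1
      have hqE : q ∈ E := (hKmem q).mp (List.mem_filter.mp hq).1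
      rcases norm_cases p q hnorm with h | h
      · exact h
      · have hple : ¬p.1 > p.2 := fun hgt => hQp.1 ⟨hgt, by rw [h]; exact hqE⟩
        have hqle : ¬q.1 > q.2 := fun hgt => hQq.1 ⟨hgt, by
          have hsw : (q.2, q.1) = p := by rw [h]
          rw [hsw]; exact hpE⟩
        have heq : q.1 = q.2 := by
          rcases p with ⟨p1, p2⟩; rcases q with ⟨q1, q2⟩
          simp only [Prod.mk.injEq] at h
          simp only at hple hqle
          omega
        rw [h]
        rcases q with ⟨q1, q2⟩
        simp only at heq
        simp [heq]
    · refine ((List.nodup_range).filter _).map_on ?_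
      intro j1 hj1 j2 hj2 hnorm
      have h1 : j1 ≠ k := by
        have := (List.mem_filter.mp hj1).2
        simp only [Bool.and_eq_true, decide_eq_true_eq] at this
        exact this.1
      rcases norm_cases (k, j1) (k, j2) hnorm with h | h
      · simp only [Prod.mk.injEq] at h
        exact h.2
      · simp only [Prod.mk.injEq] at h
        exact absurd h.2 h1
    · apply Finset.ext
      intro a
      rw [List.mem_toFinset, List.mem_toFinset, List.mem_map, List.mem_map]
      constructor
      · rintro ⟨p, hpf, rfl⟩
        obtain ⟨hpK, hpQb⟩ := List.mem_filter.mp hpf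
        obtain ⟨hproc, hkor, hcnt⟩ := hQ_elim p hpQb
        have hpE := (hKmem p).mp hpK
        have hb := hE p hpE
        rcases hkor with hk1 | hk2
        · refine ⟨p.2, List.mem_filter.mpr ⟨List.mem_range.mpr hb.2, ?_⟩, ?_⟩
          · simp only [Bool.and_eq_true, decide_eq_true_eq]
            refine ⟨fun hkp => ?_, ?_⟩
            · have h12 : p.1 = p.2 := by omega
              exact hcnt (by rw [h12])
            · rw [hk1]; exact hcnt
          · rw [hk1, Prod.mk.eta]
        · refine ⟨p.1, List.mem_filter.mpr ⟨List.mem_range.mpr hb.1, ?_⟩, ?_⟩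
          · simp only [Bool.and_eq_true, decide_eq_true_eq]
            refine ⟨fun hkp => ?_, ?_⟩
            · have h12 : p.1 = p.2 := by omega
              exact hcnt (by rw [h12])
            · rw [hk2]; exact fun hcc => hcnt hcc.symm
          · rw [hk2]
            exact norm_swap p
      · rintro ⟨j, hjf, rfl⟩
        obtain ⟨hjr, hjc⟩ := List.mem_filter.mp hjf
        have hjn := List.mem_range.mp hjr
        simp only [Bool.and_eq_true, decide_eq_true_eq] at hjc
        obtain ⟨hjk, hcnt⟩ := hjc
        have hone : (k, j) ∈ E ∨ (j, k) ∈ E := by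
          by_contra hno
          rw [not_or] at hno
          apply hcnt
          unfold pvCnt
          rw [List.count_eq_zero.mpr hno.1, List.count_eq_zero.mpr hno.2]
        by_cases hkj : k ≤ j
        · by_cases hmem : (k, j) ∈ E
          · exact ⟨(k, j), List.mem_filter.mpr ⟨(hKmem _).mpr hmem,
              hQ_intro _ (by rintro ⟨hgt, _⟩; omega) (Or.inl rfl) hcnt⟩, rfl⟩
          · have hmem2 : (j, k) ∈ E := hone.resolve_left hmem
            exact ⟨(j, k), List.mem_filter.mpr ⟨(hKmem _).mpr hmem2,
              hQ_intro _ (by rintro ⟨_, hm⟩; exact hmem hm) (Or.inr rfl)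
                (fun hcc => hcnt hcc.symm)⟩, norm_swap (k, j)⟩
        · by_cases hmem : (j, k) ∈ E
          · exact ⟨(j, k), List.mem_filter.mpr ⟨(hKmem _).mpr hmem,
              hQ_intro _ (by rintro ⟨hgt, _⟩; omega) (Or.inr rfl)
                (fun hcc => hcnt hcc.symm)⟩, norm_swap (k, j)⟩
          · have hmem2 : (k, j) ∈ E := hone.resolve_right hmem
            exact ⟨(k, j), List.mem_filter.mpr ⟨(hKmem _).mpr hmem2,
              hQ_intro _ (by rintro ⟨_, hm⟩; exact hmem hm) (Or.inl rfl) hcnt⟩, rfl⟩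
  rw [List.Perm.sum_eq (hperm.map (pvG E S k)), List.map_map,
    List.map_congr_left (fun j hj => by
      have hjk : j ≠ k := by
        have := (List.mem_filter.mp hj).2
        simp only [Bool.and_eq_true, decide_eq_true_eq] at this
        exact this.1
      show pvG E S k (pvNorm (k, j)) = pvH E S k k j
      rw [pvG_norm]
      show pvH E S k k j + pvH E S k j k = pvH E S k k j
      rw [pvH_off E S k j k (fun h => hjk h.symm)]
      ring),
    sum_map_filter]
  refine congrArg _ (List.map_congr_left fun j hj => ?_)
  by_cases hc : (decide (j ≠ k) && decide (pvCnt E k j ≠ pvCnt E j k)) = true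
  · rw [if_pos hc]
  · rw [if_neg hc]
    simp only [Bool.and_eq_true, decide_eq_true_eq, not_and_or, not_not] at hc
    unfold pvH
    rcases hc with h | h
    · rw [if_neg (fun hx => hx.1 (by rw [h]))]
    · rw [if_neg (fun hx => hx.1 h)]


-- ---------- assembling B's wins list ----------
theorem map_range_getD_at {α : Type} (n : Nat) (f : Nat → α) (i : Nat) (hi : i < n) (d : α) :
    ((List.range n).map f).getD i d = f i := by
  rw [List.getD_eq_getElem _ _ (by simpa using hi)]
  simp

theorem base_getD (S : List Int) (n : Nat) (hlen : S.length = n) (i : Nat) (hi : i < n) :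
    ((List.range n).map (fun i =>
        ((pvFirstPos (PySem.List.sorted S (fun x => x) false)).get? (S.getD i 0)).getD 0)).getD i 0
      = (((List.range n).countP (fun j => decide (S.getD j 0 < S.getD i 0)) : Nat) : Int) := by
  have hmem : S.getD i 0 ∈ S := by
    rw [List.getD_eq_getElem S 0 (by omega)]
    exact List.getElem_mem _
  have hpw : (PySem.List.sorted S (fun x => x) false).Pairwise (· ≤ ·) := by
    simpa using PySem.List.sorted_pairwise S (fun x => x)
  have hv : S.getD i 0 ∈ PySem.List.sorted S (fun x => x) false := by
    rw [PySem.List.mem_sorted]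
    exact hmem
  rw [map_range_getD_at n _ i hi 0]
  rw [fp_get _ hpw _ hv]
  rw [Option.getD_some]
  congr 1
  rw [List.Perm.countP_eq _ (PySem.List.sorted_perm S (fun x => x) false),
    countP_range, hlen]

theorem point_eq (E : List (Nat × Nat)) (n : Nat) (S : List Int) (k j : Nat)
    (hsk : S.getD k 0 = pvScE E n k) (hsj : S.getD j 0 = pvScE E n j) :
    (if decide (S.getD j 0 < S.getD k 0) = true then (1 : Int) else 0) + pvH E S k k j
      = if pvWinE E n k j = true then 1 else 0 := by
  unfold pvH pvWinE
  rw [hsk, hsj]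
  simp only [Bool.or_eq_true, Bool.and_eq_true, decide_eq_true_eq, and_true]
  split_ifs <;> omega

theorem solutionB_target (friends gifts : List String) (hn : 0 < friends.length) :
    (gifts.foldl (pvStepB friends) (PySem.Dict.empty, List.replicate friends.length 0)).1.keys.foldl
        (pvCorrStep (gifts.foldl (pvStepB friends) (PySem.Dict.empty, List.replicate friends.length 0)).1
          (gifts.foldl (pvStepB friends) (PySem.Dict.empty, List.replicate friends.length 0)).2)
        ((List.range friends.length).map (fun i =>
          ((pvFirstPos (PySem.List.sorted
              (gifts.foldl (pvStepB friends) (PySem.Dict.empty, List.replicate friends.length 0)).2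
              (fun x => x) false)).get?
            ((gifts.foldl (pvStepB friends) (PySem.Dict.empty, List.replicate friends.length 0)).2.getD i 0)).getD 0))
      = pvTarget friends gifts := by
  rw [stepB_events friends gifts PySem.Dict.empty (List.replicate friends.length 0)]
  show ((pvEvents friends gifts).foldl pvDStep PySem.Dict.empty).keys.foldl
        (pvCorrStep ((pvEvents friends gifts).foldl pvDStep PySem.Dict.empty)
          ((pvEvents friends gifts).foldl pvSStep (List.replicate friends.length 0)))
        ((List.range friends.length).map (fun i =>
          ((pvFirstPos (PySem.List.sorted
              ((pvEvents friends gifts).foldl pvSStep (List.replicate friends.length 0))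
              (fun x => x) false)).get?
            (((pvEvents friends gifts).foldl pvSStep (List.replicate friends.length 0)).getD i 0)).getD 0))
      = pvTarget friends gifts
  have hEb := pvEvents_lt friends gifts hn
  obtain ⟨hSlen, hSgetD⟩ := scoreB_eq friends.length (pvEvents friends gifts) hEb
  have hKb : ∀ p ∈ ((pvEvents friends gifts).foldl pvDStep PySem.Dict.empty).keys,
      p.1 < friends.length ∧ p.2 < friends.length := by
    intro p hp
    refine hEb p ?_
    rw [dictB_keys] at hp
    exact (PySem.Set.mem_ofList _ _).mp hp
  have hW0len : ((List.range friends.length).map (fun i =>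
      ((pvFirstPos (PySem.List.sorted
          ((pvEvents friends gifts).foldl pvSStep (List.replicate friends.length 0))
          (fun x => x) false)).get?
        (((pvEvents friends gifts).foldl pvSStep (List.replicate friends.length 0)).getD i 0)).getD 0)).length
      = friends.length := by simp
  obtain ⟨hWlen, hWgetD⟩ := corr_fold ((pvEvents friends gifts).foldl pvDStep PySem.Dict.empty)
    ((pvEvents friends gifts).foldl pvSStep (List.replicate friends.length 0))
    ((pvEvents friends gifts).foldl pvDStep PySem.Dict.empty).keys
    ((List.range friends.length).map (fun i =>
      ((pvFirstPos (PySem.List.sorted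
          ((pvEvents friends gifts).foldl pvSStep (List.replicate friends.length 0))
          (fun x => x) false)).get?
        (((pvEvents friends gifts).foldl pvSStep (List.replicate friends.length 0)).getD i 0)).getD 0))
    (by rw [hW0len]; exact hKb)
  apply List.ext_getElem
  · rw [hWlen, hW0len]
    simp [pvTarget]
  · intro k hk1 hk2
    have hkn : k < friends.length := by rw [hWlen, hW0len] at hk1; exact hk1
    rw [← List.getD_eq_getElem _ 0 hk1, hWgetD k,
      base_getD ((pvEvents friends gifts).foldl pvSStep (List.replicate friends.length 0))
        friends.length hSlen k hkn,
      delta_sum friends.length (pvEvents friends gifts) hEb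
        ((pvEvents friends gifts).foldl pvSStep (List.replicate friends.length 0)) k]
    unfold pvTarget
    rw [List.getElem_map, List.getElem_range,
      ← PySem.List.sum_map_ite_one_zero
        (fun j => decide (((pvEvents friends gifts).foldl pvSStep (List.replicate friends.length 0)).getD j 0
          < ((pvEvents friends gifts).foldl pvSStep (List.replicate friends.length 0)).getD k 0))
        (List.range friends.length),
      ← PySem.List.sum_map_ite_one_zero (pvWinE (pvEvents friends gifts) friends.length k)
        (List.range friends.length),
      ← PySem.List.sum_map_add_int]
    refine congrArg _ (List.map_congr_left fun j hj => ?_)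
    exact point_eq (pvEvents friends gifts) friends.length
      ((pvEvents friends gifts).foldl pvSStep (List.replicate friends.length 0)) k j
      (hSgetD k hkn) (hSgetD j (List.mem_range.mp hj))

-- ===== VERDICT (by name: the statement is the Claim_ definition above) =====
theorem solution_spec : Claim_equal_solution := by
  unfold Claim_equal_solution Spec_solution
  intro friends gifts _ hpre
  have hn : 0 < friends.length := List.length_pos_iff.mpr hpre.1
  show (PySem.List.max? (pvNextA (pvGive friends gifts)
      (pvScoreA (pvGive friends gifts) friends.length) friends.length) (fun x => x)).getD 0
    = solution_alt friends gifts
  rw [solutionA_target friends gifts hn]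
  show _ = (PySem.List.max?
      ((gifts.foldl (pvStepB friends) (PySem.Dict.empty, List.replicate friends.length 0)).1.keys.foldl
        (pvCorrStep (gifts.foldl (pvStepB friends) (PySem.Dict.empty, List.replicate friends.length 0)).1
          (gifts.foldl (pvStepB friends) (PySem.Dict.empty, List.replicate friends.length 0)).2)
        ((List.range friends.length).map (fun i =>
          ((pvFirstPos (PySem.List.sorted
              (gifts.foldl (pvStepB friends) (PySem.Dict.empty, List.replicate friends.length 0)).2
              (fun x => x) false)).get?
            ((gifts.foldl (pvStepB friends) (PySem.Dict.empty, List.replicate friends.length 0)).2.getD i 0)).getD 0)))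
      (fun x => x)).getD 0
  rw [solutionB_target friends gifts hn]
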